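-- pv_equiv track=rewrite | github.com/Tch1b0/aoc2021 | day_7/solution.py | complex_fuel_cost
-- ===== SOURCE A (Python) =====
-- def complex_fuel_cost(point1: int, point2: int):
--     start, end = (point1, point2) if point1 < point2 else (point2, point1)
--     fuel_increment = 1
--     fuel_cost = 0
--     for _ in range(start, end):
--         fuel_cost += fuel_increment
--         fuel_increment += 1
--
--     return fuel_cost
-- ===== SOURCE B (Python) =====
-- def complex_fuel_cost(point1: int, point2: int):
--     n = abs(point1 - point2)
--     return n * (n + 1) // 2
-- ===== Notes on version B (the rewrite author's own statement) =====
-- stated objective: faster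
-- what changed: Replaced the per-step accumulation loop by the closed-form triangular number n*(n+1)//2 with n = |point1 - point2|.
import Mathlib
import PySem

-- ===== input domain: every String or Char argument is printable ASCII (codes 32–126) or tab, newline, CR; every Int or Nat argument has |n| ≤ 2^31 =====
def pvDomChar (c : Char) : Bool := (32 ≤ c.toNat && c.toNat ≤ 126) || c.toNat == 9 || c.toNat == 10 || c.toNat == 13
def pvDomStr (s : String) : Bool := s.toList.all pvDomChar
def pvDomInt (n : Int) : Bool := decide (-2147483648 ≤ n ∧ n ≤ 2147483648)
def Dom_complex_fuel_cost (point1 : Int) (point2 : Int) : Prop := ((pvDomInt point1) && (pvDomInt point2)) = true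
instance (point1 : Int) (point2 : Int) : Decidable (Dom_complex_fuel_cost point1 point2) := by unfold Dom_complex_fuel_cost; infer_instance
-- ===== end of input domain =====

-- B replaces A's per-step accumulation loop by the closed-form triangular number n*(n+1)//2 (faster).


-- ===== PORT A =====
-- literal port: pick (start, end), then fold over range(start, end) with state (fuel_increment, fuel_cost)
def complex_fuel_cost (point1 : Int) (point2 : Int) : Int :=
  let se := if point1 < point2 then (point1, point2) else (point2, point1)
  let st : Int × Int :=
    (PySem.List.pyRange se.1 se.2 1).foldl
      (fun (st : Int × Int) _ => (st.1 + 1, st.2 + st.1)) (1, 0)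
  st.2

-- ===== PORT B =====
-- literal port of Source B: n = abs(point1 - point2); n * (n + 1) // 2
def complex_fuel_cost_alt (point1 : Int) (point2 : Int) : Int :=
  let n : Int := ((point1 - point2).natAbs : Int)
  PySem.Int.floordiv (n * (n + 1)) 2

-- ===== PRECONDITION & SPEC =====
def Spec_complex_fuel_cost (point1 : Int) (point2 : Int) (out : Int) : Prop := out = complex_fuel_cost_alt point1 point2
instance (point1 : Int) (point2 : Int) (out : Int) : Decidable (Spec_complex_fuel_cost point1 point2 out) := by unfold Spec_complex_fuel_cost; infer_instance

-- ===== CLAIM (what is proved, stated in full; the proofs are below) =====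
def Claim_equal_complex_fuel_cost : Prop := ∀ (point1 : Int) (point2 : Int), Dom_complex_fuel_cost point1 point2 → Spec_complex_fuel_cost point1 point2 (complex_fuel_cost point1 point2)

-- ===== LEMMAS AND PROOFS =====

-- the loop's fold on any list of length n, started at (i, c), ends with cost c + n*i + n*(n-1)/2,
-- expressed via 2*cost to avoid division
theorem fuel_foldl (l : List Int) (i c : Int) :
    2 * (l.foldl (fun (st : Int × Int) _ => (st.1 + 1, st.2 + st.1)) (i, c)).2
      = 2 * c + 2 * (l.length : Int) * i + (l.length : Int) * ((l.length : Int) - 1) := by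
  induction l generalizing i c with
  | nil => simp
  | cons a t ih =>
    simp only [List.foldl_cons, List.length_cons, ih]
    push_cast
    ring

theorem complex_fuel_cost_spec : Claim_equal_complex_fuel_cost := by
  unfold Claim_equal_complex_fuel_cost
  intro p1 p2 _
  unfold Spec_complex_fuel_cost
  set n : Int := ((p1 - p2).natAbs : Int) with hn
  have hcost : 2 * (complex_fuel_cost p1 p2) = n * (n + 1) := by
    unfold complex_fuel_cost
    by_cases h : p1 < p2 <;> simp only [h, if_pos, if_false] <;>
      · rw [fuel_foldl, PySem.List.length_pyRange_one]
        first
        | (have hL : (((p2 - p1).toNat : Nat) : Int) = n := by simp only [hn]; omega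
           rw [hL]; ring)
        | (have hL : (((p1 - p2).toNat : Nat) : Int) = n := by simp only [hn]; omega
           rw [hL]; ring)
  have hb : complex_fuel_cost_alt p1 p2 = PySem.Int.floordiv (n * (n + 1)) 2 := by
    unfold complex_fuel_cost_alt
    rw [hn]
  rw [hb, eq_comm, PySem.Int.floordiv_eq_iff_of_pos (by norm_num : (0:Int) < 2)]
  constructor <;> omega

-- ===== VERDICT (by name: the statement is the Claim_ definition above) =====
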